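-- pv_equiv track=rewrite | github.com/dpcjzpeter/CSC108_CSC148 | 108_assignment_3/network_functions.py | get_tupple
-- ===== SOURCE A (Python) =====
-- from typing import List, Tuple, Dict, TextIO
--
-- def score_three(score_list: List[str], friend_list: List[str]) -> List[str]:
--     """Return a list of people from friend_list with score three.
--     """
--     three = []
--     for i in range(len(score_list)):
--         if score_list[i] == 3:
--             three.append(friend_list[i])
--     three.sort()
--     return three
--
-- def score_two(score_list: List[str], friend_list: List[str]) -> List[str]:
--     """Return a list of people from friend_list with score two.
--     """
--     two = []
--     for i in range(len(score_list)):
--         if score_list[i] == 2: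
--             two.append(friend_list[i])
--     two.sort()
--     return two
--
-- def score_one(score_list: List[str], friend_list: List[str]) -> List[str]:
--     """Return a list of people from friend_list with score one.
--     """
--     one = []
--     for i in range(len(score_list)):
--         if score_list[i] == 1:
--             one.append(friend_list[i])
--     one.sort()
--     return one
--
-- def get_tupple(score_list: List[str], friend_list: List[str]) -> List[str]:
--     """Return the friend recommendations for the given person as a list of
--     tuples where the first element of each tuple is a potential friend's name
--     (in the same format as the dictionary keys) and the second element is that
--     potential friend's score.
--     """
--     three = score_three(score_list, friend_list)
--     two = score_two(score_list, friend_list)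
--     one = score_one(score_list, friend_list)
--
--     final = []
--     for name4 in three:
--         tup = (name4, 3)
--         final.append(tup)
--     for name5 in two:
--         tup = (name5, 2)
--         final.append(tup)
--     for name6 in one:
--         tup = (name6, 1)
--         final.append(tup)
--
--     return final
-- ===== SOURCE B (Python) =====
-- def get_tupple(score_list, friend_list):
--     """One filtered pass collecting (name, score) pairs, then a single
--     composite-key sort: score descending (3,2,1), name ascending."""
--     pairs = [(friend_list[i], score_list[i])
--              for i in range(len(score_list))
--              if score_list[i] in (1, 2, 3)]
--     pairs.sort(key=lambda p: (-p[1], p[0]))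
--     return pairs
-- ===== Notes on version B (the rewrite author's own statement) =====
-- stated objective: simpler
-- what changed: Replaces three filtered scans plus three separate sorts and three append loops by one filtered pass collecting (name, score) pairs and a single composite-key sort on (-score, name).
import Mathlib
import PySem

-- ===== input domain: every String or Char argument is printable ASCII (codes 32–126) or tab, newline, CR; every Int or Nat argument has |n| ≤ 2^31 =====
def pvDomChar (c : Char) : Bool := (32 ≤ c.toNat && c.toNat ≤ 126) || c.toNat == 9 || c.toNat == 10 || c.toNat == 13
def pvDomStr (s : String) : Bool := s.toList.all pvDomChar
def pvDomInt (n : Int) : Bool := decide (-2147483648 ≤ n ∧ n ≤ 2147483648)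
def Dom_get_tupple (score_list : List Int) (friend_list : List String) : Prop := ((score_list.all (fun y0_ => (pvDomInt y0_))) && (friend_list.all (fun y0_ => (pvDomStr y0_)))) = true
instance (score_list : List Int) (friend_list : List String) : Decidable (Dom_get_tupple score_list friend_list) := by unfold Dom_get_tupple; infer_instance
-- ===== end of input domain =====

-- B replaces A's three filtered scans + three sorts + three append loops by one
-- filtered pass and a single composite-key sort on (-score, name); same cost class.

-- ===== PORT A =====
def score_three (score_list : List Int) (friend_list : List String) : List String :=
  let three := (PySem.List.pyRange 0 (score_list.length : Int) 1).foldl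
    (fun acc i => if PySem.List.pyGetD score_list i 0 = 3
      then acc ++ [PySem.List.pyGetD friend_list i ""] else acc) []
  PySem.List.sorted three (fun x => x)

def score_two (score_list : List Int) (friend_list : List String) : List String :=
  let two := (PySem.List.pyRange 0 (score_list.length : Int) 1).foldl
    (fun acc i => if PySem.List.pyGetD score_list i 0 = 2
      then acc ++ [PySem.List.pyGetD friend_list i ""] else acc) []
  PySem.List.sorted two (fun x => x)

def score_one (score_list : List Int) (friend_list : List String) : List String :=
  let one := (PySem.List.pyRange 0 (score_list.length : Int) 1).foldl
    (fun acc i => if PySem.List.pyGetD score_list i 0 = 1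
      then acc ++ [PySem.List.pyGetD friend_list i ""] else acc) []
  PySem.List.sorted one (fun x => x)

def get_tupple (score_list : List Int) (friend_list : List String) : List (String × Int) :=
  let three := score_three score_list friend_list
  let two := score_two score_list friend_list
  let one := score_one score_list friend_list
  let final : List (String × Int) := []
  let final := three.foldl (fun acc name4 => acc ++ [(name4, (3 : Int))]) final
  let final := two.foldl (fun acc name5 => acc ++ [(name5, (2 : Int))]) final
  let final := one.foldl (fun acc name6 => acc ++ [(name6, (1 : Int))]) final
  final

-- ===== PORT B =====
def get_tupple_alt (score_list : List Int) (friend_list : List String) : List (String × Int) :=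
  let pairs := (PySem.List.pyRange 0 (score_list.length : Int) 1).foldl
    (fun acc i => if PySem.List.pyGetD score_list i 0 = 1 ∨ PySem.List.pyGetD score_list i 0 = 2
                      ∨ PySem.List.pyGetD score_list i 0 = 3
      then acc ++ [(PySem.List.pyGetD friend_list i "", PySem.List.pyGetD score_list i 0)] else acc) []
  PySem.List.sorted2 pairs (fun p => -p.2) (fun p => p.1)

-- ===== PRECONDITION & SPEC =====
-- A (and B) raise IndexError exactly when some position i with score 1, 2 or 3
-- lies beyond the end of friend_list; Pre_ excludes exactly those inputs.
def Pre_get_tupple (score_list : List Int) (friend_list : List String) : Prop :=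
  ∀ i < score_list.length,
    (score_list.getD i 0 = 1 ∨ score_list.getD i 0 = 2 ∨ score_list.getD i 0 = 3) →
      i < friend_list.length
instance (score_list : List Int) (friend_list : List String) : Decidable (Pre_get_tupple score_list friend_list) := by unfold Pre_get_tupple; infer_instance

def pvWitness_get_tupple : List Int × List String := ([3, 1, 5, 2, 3], ["b", "a", "c", "d", "a"])

def Spec_get_tupple (score_list : List Int) (friend_list : List String) (out : List (String × Int)) : Prop := out = get_tupple_alt score_list friend_list
instance (score_list : List Int) (friend_list : List String) (out : List (String × Int)) : Decidable (Spec_get_tupple score_list friend_list out) := by unfold Spec_get_tupple; infer_instance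

-- ===== CLAIM (what is proved, stated in full; the proofs are below) =====
def Claim_equal_get_tupple : Prop := ∀ (score_list : List Int) (friend_list : List String), Dom_get_tupple score_list friend_list → Pre_get_tupple score_list friend_list → Spec_get_tupple score_list friend_list (get_tupple score_list friend_list)

-- ===== LEMMAS AND PROOFS =====

-- The lexicographic key B sorts by.
def pvKey (p : String × Int) : Lex (Int × String) := toLex (-p.2, p.1)

theorem pvKey_inj : Function.Injective pvKey := by
  intro a b h
  have h' : ((-a.2 : Int), a.1) = ((-b.2 : Int), b.1) := toLex.injective h
  have h1 := congrArg Prod.fst h'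
  have h2 := congrArg Prod.snd h'
  simp only at h1 h2
  exact Prod.ext h2 (by omega)

-- sorted2 with keys k1, k2 is sorted with the lexicographic pair key.
theorem sorted2_eq_sorted_lex {α : Type} (xs : List α) (k1 : α → Int) (k2 : α → String) :
    PySem.List.sorted2 xs k1 k2 = PySem.List.sorted xs (fun x => toLex (k1 x, k2 x)) := by
  simp only [PySem.List.sorted2, PySem.List.sorted]
  have hcmp : (fun a b => decide (k1 a < k1 b) || (!decide (k1 b < k1 a) && decide (k2 a < k2 b)))
      = (fun a b => decide ((toLex (k1 a, k2 a) : Lex (Int × String)) < toLex (k1 b, k2 b))) := by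
    funext a b
    rcases lt_trichotomy (k1 a) (k1 b) with h | h | h
    · simp [Prod.Lex.lt_iff, h]
    · simp [Prod.Lex.lt_iff, h]
    · simp [Prod.Lex.lt_iff, not_lt_of_gt h, h.ne']
      intro hab
      exact absurd h (not_lt_of_ge hab)
  rw [hcmp]
  rfl

-- The whole equivalence, generalized over the index list and the two lookups.
theorem pv_general (R : List Int) (sc : Int → Int) (fr : Int → String) :
    ((PySem.List.sorted (R.foldl (fun acc i => if sc i = 3 then acc ++ [fr i] else acc) []) (fun x => x)).foldl
        (fun acc n => acc ++ [(n, (3 : Int))]) []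
      |> (PySem.List.sorted (R.foldl (fun acc i => if sc i = 2 then acc ++ [fr i] else acc) []) (fun x => x)).foldl
        (fun acc n => acc ++ [(n, (2 : Int))])
      |> (PySem.List.sorted (R.foldl (fun acc i => if sc i = 1 then acc ++ [fr i] else acc) []) (fun x => x)).foldl
        (fun acc n => acc ++ [(n, (1 : Int))]))
    = PySem.List.sorted2
        (R.foldl (fun acc i => if sc i = 1 ∨ sc i = 2 ∨ sc i = 3 then acc ++ [(fr i, sc i)] else acc) [])
        (fun p => -p.2) (fun p => p.1) := by
  rw [PySem.List.foldl_append_ite (p := fun i => sc i = 3) (f := fr),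
      PySem.List.foldl_append_ite (p := fun i => sc i = 2) (f := fr),
      PySem.List.foldl_append_ite (p := fun i => sc i = 1) (f := fr),
      PySem.List.foldl_append_ite (p := fun i => sc i = 1 ∨ sc i = 2 ∨ sc i = 3)
        (f := fun i => (fr i, sc i))]
  simp only [List.nil_append]
  rw [PySem.List.foldl_append_singleton_eq_map, PySem.List.foldl_append_singleton_eq_map,
      PySem.List.foldl_append_singleton_eq_map, List.nil_append, List.append_assoc,
      sorted2_eq_sorted_lex]
  -- name the two sides
  set L := (PySem.List.sorted ((R.filter (fun i => decide (sc i = 3))).map fr) (fun x => x)).map (fun n => (n, (3:Int)))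
      ++ ((PySem.List.sorted ((R.filter (fun i => decide (sc i = 2))).map fr) (fun x => x)).map (fun n => (n, (2:Int)))
      ++ (PySem.List.sorted ((R.filter (fun i => decide (sc i = 1))).map fr) (fun x => x)).map (fun n => (n, (1:Int)))) with hL
  set P := (R.filter (fun i => decide (sc i = 1 ∨ sc i = 2 ∨ sc i = 3))).map (fun i => (fr i, sc i)) with hP
  show L = PySem.List.sorted P (fun p => toLex (-p.2, p.1))
  have hkey : (fun p : String × Int => toLex (-p.2, p.1)) = pvKey := rfl
  rw [hkey]
  -- (1) permutation: L ~ P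
  have hgroup : ∀ k : Int, ((R.filter (fun i => decide (sc i = k))).map fr).map (fun n => (n, k))
      = (R.filter (fun i => decide (sc i = k))).map (fun i => (fr i, sc i)) := by
    intro k
    rw [List.map_map]
    refine List.map_congr_left ?_
    intro i hi
    have := List.of_mem_filter hi
    simp only [decide_eq_true_eq] at this
    simp [this]
  have hsplit : (R.filter (fun i => decide (sc i = 1 ∨ sc i = 2 ∨ sc i = 3))).Perm
      (R.filter (fun i => decide (sc i = 3)) ++ (R.filter (fun i => decide (sc i = 2)) ++ R.filter (fun i => decide (sc i = 1)))) := by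
    set q := fun i => decide (sc i = 1 ∨ sc i = 2 ∨ sc i = 3) with hq
    have h1 := (List.filter_append_perm (fun i => decide (sc i = 3)) (R.filter q)).symm
    have e3 : (R.filter q).filter (fun i => decide (sc i = 3)) = R.filter (fun i => decide (sc i = 3)) := by
      rw [List.filter_filter]
      refine List.filter_congr ?_
      intro i _
      by_cases h : sc i = 3 <;> simp [hq, h]
    have e12 : (R.filter q).filter (fun i => !decide (sc i = 3)) = R.filter (fun i => decide (sc i = 1 ∨ sc i = 2)) := by
      rw [List.filter_filter]
      refine List.filter_congr ?_
      intro i _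
      by_cases h1 : sc i = 1 <;> by_cases h2 : sc i = 2 <;> by_cases h3 : sc i = 3 <;>
        simp [hq, h1, h2, h3]
    rw [e3, e12] at h1
    have h2 := (List.filter_append_perm (fun i => decide (sc i = 2)) (R.filter (fun i => decide (sc i = 1 ∨ sc i = 2)))).symm
    have e2 : (R.filter (fun i => decide (sc i = 1 ∨ sc i = 2))).filter (fun i => decide (sc i = 2)) = R.filter (fun i => decide (sc i = 2)) := by
      rw [List.filter_filter]
      refine List.filter_congr ?_
      intro i _
      by_cases h : sc i = 2 <;> simp [h]
    have e1 : (R.filter (fun i => decide (sc i = 1 ∨ sc i = 2))).filter (fun i => !decide (sc i = 2)) = R.filter (fun i => decide (sc i = 1)) := by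
      rw [List.filter_filter]
      refine List.filter_congr ?_
      intro i _
      by_cases h1 : sc i = 1 <;> by_cases h2 : sc i = 2 <;> simp [h1, h2]
    rw [e2, e1] at h2
    exact h1.trans (List.Perm.append_left _ h2)
  have hperm : L.Perm P := by
    have hmap := (hsplit.map (fun i => (fr i, sc i))).symm
    simp only [List.map_append] at hmap
    rw [hP]
    refine List.Perm.trans ?_ hmap
    refine List.Perm.append ?_ (List.Perm.append ?_ ?_) <;>
      · rw [← hgroup]
        exact ((PySem.List.sorted_perm _ _ _).map _)
  -- (2) both sides are pairwise-nondecreasing in pvKey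
  have hpwgroup : ∀ (k : Int) (xs : List String),
      (((PySem.List.sorted xs (fun x => x)).map (fun n => (n, k))).Pairwise (fun a b => pvKey a ≤ pvKey b)) := by
    intro k xs
    have := PySem.List.sorted_pairwise xs (fun x => x)
    refine List.Pairwise.map _ ?_ this
    intro a b hab
    simp [pvKey, Prod.Lex.le_iff, hab]
  have hcross : ∀ (k k' : Int), k' < k → ∀ (a b : String × Int), a.2 = k → b.2 = k' → pvKey a ≤ pvKey b := by
    intro k k' hkk a b ha hb
    simp [pvKey, Prod.Lex.le_iff, ha, hb]
    omega
  have hmem2 : ∀ (k : Int) (xs : List String) (p : String × Int),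
      p ∈ (PySem.List.sorted xs (fun x => x)).map (fun n => (n, k)) → p.2 = k := by
    intro k xs p hp
    rcases List.mem_map.1 hp with ⟨n, _, rfl⟩
    rfl
  have hpwL : L.Pairwise (fun a b => pvKey a ≤ pvKey b) := by
    rw [hL, List.pairwise_append]
    refine ⟨hpwgroup 3 _, ?_, ?_⟩
    · rw [List.pairwise_append]
      refine ⟨hpwgroup 2 _, hpwgroup 1 _, ?_⟩
      intro a ha b hb
      exact hcross 2 1 (by omega) a b (hmem2 _ _ _ ha) (hmem2 _ _ _ hb)
    · intro a ha b hb
      rcases List.mem_append.1 hb with hb' | hb'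
      · exact hcross 3 2 (by omega) a b (hmem2 _ _ _ ha) (hmem2 _ _ _ hb')
      · exact hcross 3 1 (by omega) a b (hmem2 _ _ _ ha) (hmem2 _ _ _ hb')
  have hpwS : (PySem.List.sorted P pvKey).Pairwise (fun a b => pvKey a ≤ pvKey b) :=
    PySem.List.sorted_pairwise P pvKey
  -- (3) conclude by uniqueness of the sorted arrangement under an injective key
  have hperm2 : L.Perm (PySem.List.sorted P pvKey) :=
    hperm.trans (PySem.List.sorted_perm P pvKey false).symm
  exact PySem.List.eq_of_perm_of_pairwise_le_of_injective pvKey pvKey_inj hperm2 hpwL hpwS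

-- ===== VERDICT (by name: the statement is the Claim_ definition above) =====
theorem get_tupple_spec : Claim_equal_get_tupple := by
  intro score_list friend_list _ _
  show get_tupple score_list friend_list = get_tupple_alt score_list friend_list
  unfold get_tupple get_tupple_alt score_three score_two score_one
  exact pv_general (PySem.List.pyRange 0 (score_list.length : Int) 1)
    (fun i => PySem.List.pyGetD score_list i 0) (fun i => PySem.List.pyGetD friend_list i "")
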